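-- pv_equiv track=rewrite | github.com/idgoodrich/capstoneteam42 | capstone/scheduler.py | convertToPeriodsTime
-- ===== SOURCE A (Python) =====
-- def convertToPeriodsTime(time):
--   newTime = 0
--   if time % 100 == 0 or (time + 70) % 100 == 0:
--     newTime = time
--   else:
--     for j in range(5):
--       temp_time = time
--       #addes 5 to xx25 or xx55 and appends
--       if (time + 75) % 100 == 0:
--         time = time + 5
--         newTime = time
--         break
--       if (time + 45) % 100 == 0:
--         time = time + 45
--         newTime = time
--         break
--       if (time + 50) % 100 == 0:
--         time = time + 50
--         newTime = time
--         break
--       if (time + 80) % 100 == 0: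
--         time = time + 10
--         newTime = time
--         break
--       #Lowers time to the next period interval
--       new_time = time - ((j + 1) * 5)
--       if new_time % 100 == 0 or (new_time + 70) % 100 == 0:
--         newTime = new_time
--         break
--
--   return newTime
-- ===== SOURCE B (Python) =====
-- def convertToPeriodsTime(time):
--   m = time % 100
--   base = time - m
--   if m == 0 or m == 30:
--     return time
--   if m in (5, 10, 15):
--     return base
--   if m in (20, 25, 35, 40, 45):
--     return base + 30
--   if m in (50, 55):
--     return base + 100
--   return 0
-- ===== Notes on version B (the rewrite author's own statement) =====
-- stated objective: simpler
-- what changed: Replaces the fixed-iteration subtract-and-test search and its four special-case break branches by a direct closed-form dispatch on the minute remainder of the time value.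
import Mathlib
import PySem

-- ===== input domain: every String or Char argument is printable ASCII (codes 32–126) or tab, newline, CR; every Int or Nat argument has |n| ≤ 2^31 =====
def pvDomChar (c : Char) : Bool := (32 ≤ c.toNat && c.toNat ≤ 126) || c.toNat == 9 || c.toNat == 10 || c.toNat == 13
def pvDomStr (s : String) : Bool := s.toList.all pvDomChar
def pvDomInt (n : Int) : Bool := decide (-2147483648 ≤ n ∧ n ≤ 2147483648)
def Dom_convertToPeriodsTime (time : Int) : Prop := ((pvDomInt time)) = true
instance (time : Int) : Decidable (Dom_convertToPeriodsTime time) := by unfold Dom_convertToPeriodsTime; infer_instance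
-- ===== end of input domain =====

-- B replaces A's 5-iteration subtract-and-test loop by a closed-form dispatch on time % 100 (simpler).

-- ===== PORT A =====
-- the 'for j in range(5)' loop: 'time' is only reassigned on break paths that immediately
-- return, so each iteration is a function of the unchanged 'time' and the current j.
def convertToPeriodsTime_loop (time : Int) : List Int → Int
  | [] => 0                        -- loop exhausted without break: newTime keeps its initial 0
  | j :: rest =>
    if PySem.Int.mod (time + 75) 100 = 0 then time + 5
    else if PySem.Int.mod (time + 45) 100 = 0 then time + 45
    else if PySem.Int.mod (time + 50) 100 = 0 then time + 50
    else if PySem.Int.mod (time + 80) 100 = 0 then time + 10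
    else
      let new_time := time - ((j + 1) * 5)
      if PySem.Int.mod new_time 100 = 0 ∨ PySem.Int.mod (new_time + 70) 100 = 0 then new_time
      else convertToPeriodsTime_loop time rest

def convertToPeriodsTime (time : Int) : Int :=
  if PySem.Int.mod time 100 = 0 ∨ PySem.Int.mod (time + 70) 100 = 0 then time
  else convertToPeriodsTime_loop time (PySem.List.pyRange 0 5 1)

-- ===== PORT B =====
def convertToPeriodsTime_alt (time : Int) : Int :=
  let m := PySem.Int.mod time 100
  let base := time - m
  if m = 0 ∨ m = 30 then time
  else if m = 5 ∨ m = 10 ∨ m = 15 then base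
  else if m = 20 ∨ m = 25 ∨ m = 35 ∨ m = 40 ∨ m = 45 then base + 30
  else if m = 50 ∨ m = 55 then base + 100
  else 0

-- ===== PRECONDITION & SPEC =====
def Spec_convertToPeriodsTime (time : Int) (out : Int) : Prop := out = convertToPeriodsTime_alt time
instance (time : Int) (out : Int) : Decidable (Spec_convertToPeriodsTime time out) := by unfold Spec_convertToPeriodsTime; infer_instance

-- ===== CLAIM (what is proved, stated in full; the proofs are below) =====
def Claim_equal_convertToPeriodsTime : Prop := ∀ (time : Int), Dom_convertToPeriodsTime time → Spec_convertToPeriodsTime time (convertToPeriodsTime time)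

-- ===== LEMMAS AND PROOFS =====

lemma pyRange05 : PySem.List.pyRange 0 5 1 = [0, 1, 2, 3, 4] := by decide

lemma pymod100 (a : Int) : PySem.Int.mod a 100 = a % 100 :=
  PySem.Int.mod_eq_emod_of_pos (by norm_num)

set_option maxHeartbeats 1000000 in
lemma convert_eq (time : Int) : convertToPeriodsTime time = convertToPeriodsTime_alt time := by
  have c0 : (time % 100 = 0 ∨ (time + 70) % 100 = 0) ↔ (time % 100 = 0 ∨ time % 100 = 30) := by omega
  have c75 : ((time + 75) % 100 = 0) ↔ time % 100 = 25 := by omega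
  have c45 : ((time + 45) % 100 = 0) ↔ time % 100 = 55 := by omega
  have c50 : ((time + 50) % 100 = 0) ↔ time % 100 = 50 := by omega
  have c80 : ((time + 80) % 100 = 0) ↔ time % 100 = 20 := by omega
  have j0 : ((time - (0 + 1) * 5) % 100 = 0 ∨ (time - (0 + 1) * 5 + 70) % 100 = 0) ↔ (time % 100 = 5 ∨ time % 100 = 35) := by omega
  have j1 : ((time - (1 + 1) * 5) % 100 = 0 ∨ (time - (1 + 1) * 5 + 70) % 100 = 0) ↔ (time % 100 = 10 ∨ time % 100 = 40) := by omega
  have j2 : ((time - (2 + 1) * 5) % 100 = 0 ∨ (time - (2 + 1) * 5 + 70) % 100 = 0) ↔ (time % 100 = 15 ∨ time % 100 = 45) := by omega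
  have j3 : ((time - (3 + 1) * 5) % 100 = 0 ∨ (time - (3 + 1) * 5 + 70) % 100 = 0) ↔ (time % 100 = 20 ∨ time % 100 = 50) := by omega
  have j4 : ((time - (4 + 1) * 5) % 100 = 0 ∨ (time - (4 + 1) * 5 + 70) % 100 = 0) ↔ (time % 100 = 25 ∨ time % 100 = 55) := by omega
  unfold convertToPeriodsTime convertToPeriodsTime_alt
  rw [pyRange05]
  simp only [convertToPeriodsTime_loop, pymod100, c0, c75, c45, c50, c80, j0, j1, j2, j3, j4]
  split_ifs <;> omega

-- ===== VERDICT (by name: the statement is the Claim_ definition above) =====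
theorem convertToPeriodsTime_spec : Claim_equal_convertToPeriodsTime := by
  intro time _
  unfold Spec_convertToPeriodsTime
  exact convert_eq time
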